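-- pv_equiv track=rewrite | github.com/banton/medical-patients | medical_simulation/treatment_protocols.py | _prioritize_critical_treatments
-- ===== SOURCE A (Python) =====
-- from typing import Dict, List, Optional, Set
--
-- def _prioritize_critical_treatments(treatments: List[str]) -> List[str]:
--     """Prioritize treatments for critical time window."""
--     # Define priority order for critical interventions
--     priority_order = [
--         "tourniquet",
--         "airway_positioning",
--         "needle_decompression",
--         "pressure_bandage",
--         "hemostatic_gauze",
--         "iv_access",
--         "blood_transfusion",
--         "damage_control_surgery",
--         "intubation",
--     ]
--
--     # Sort treatments by priority
--     prioritized = []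
--     for treatment in priority_order:
--         if treatment in treatments:
--             prioritized.append(treatment)
--
--     # Add remaining treatments
--     for treatment in treatments:
--         if treatment not in prioritized:
--             prioritized.append(treatment)
--
--     return prioritized
-- ===== SOURCE B (Python) =====
-- from typing import Dict, List, Optional, Set
--
--
-- def _prioritize_critical_treatments(treatments: List[str]) -> List[str]:
--     """Prioritize treatments for critical time window."""
--     priority_order = [
--         "tourniquet",
--         "airway_positioning",
--         "needle_decompression",
--         "pressure_bandage",
--         "hemostatic_gauze",
--         "iv_access",
--         "blood_transfusion",
--         "damage_control_surgery",
--         "intubation",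
--     ]
--     rank = {t: i for i, t in enumerate(priority_order)}
--     # Stable sort of the deduplicated input: priority items order by rank,
--     # everything else keeps first-occurrence order after them.
--     return sorted(dict.fromkeys(treatments),
--                   key=lambda t: rank.get(t, len(priority_order)))
-- ===== Notes on version B (the rewrite author's own statement) =====
-- stated objective: faster
-- what changed: Replaces A's two membership-scan passes (priority list scanned against the input, then the input scanned against the growing output list) with a rank table plus ONE stable sort of the deduplicated input keyed by rank with a sentinel for non-priority items.
import Mathlib
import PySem

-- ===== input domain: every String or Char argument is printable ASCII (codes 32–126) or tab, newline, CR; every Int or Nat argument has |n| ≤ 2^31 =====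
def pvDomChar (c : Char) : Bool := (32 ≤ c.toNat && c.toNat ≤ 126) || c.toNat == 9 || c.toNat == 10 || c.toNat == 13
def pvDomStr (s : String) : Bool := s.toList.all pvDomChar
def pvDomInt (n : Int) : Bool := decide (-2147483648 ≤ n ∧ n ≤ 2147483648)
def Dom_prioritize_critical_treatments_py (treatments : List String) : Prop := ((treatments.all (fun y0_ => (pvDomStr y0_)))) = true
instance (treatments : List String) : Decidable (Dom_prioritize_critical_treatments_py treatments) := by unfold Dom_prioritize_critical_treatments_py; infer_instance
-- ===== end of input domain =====

-- B replaces A's staged membership-scan passes by a rank table and ONE stable sort of the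
-- deduplicated input, keyed by rank with a sentinel for non-priority items (objective: faster).

-- ===== PORT A =====
-- the priority_order literal (appears verbatim in both Pythons)
def pvPriorityOrder : List String :=
  ["tourniquet", "airway_positioning", "needle_decompression", "pressure_bandage",
   "hemostatic_gauze", "iv_access", "blood_transfusion", "damage_control_surgery", "intubation"]

def prioritize_critical_treatments_py (treatments : List String) : List String :=
  -- for treatment in priority_order: if treatment in treatments: prioritized.append(treatment)
  let prioritized := pvPriorityOrder.foldl
    (fun acc t => if t ∈ treatments then acc ++ [t] else acc) []
  -- for treatment in treatments: if treatment not in prioritized: prioritized.append(treatment)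
  treatments.foldl (fun acc t => if t ∉ acc then acc ++ [t] else acc) prioritized

-- ===== PORT B =====
-- rank = {t: i for i, t in enumerate(priority_order)}
def pvRank : PySem.Dict String Int :=
  (PySem.List.enumerate pvPriorityOrder 0).foldl
    (fun d p => d.insert p.2 ((p.1 : Int))) PySem.Dict.empty

def prioritize_critical_treatments_py_alt (treatments : List String) : List String :=
  -- sorted(dict.fromkeys(treatments), key=lambda t: rank.get(t, len(priority_order)))
  PySem.List.sorted (PySem.List.dedup treatments)
    (fun t => pvRank.getD t ((pvPriorityOrder.length : Int)))

-- ===== PRECONDITION & SPEC =====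
def Spec_prioritize_critical_treatments_py (treatments : List String) (out : List String) : Prop := out = prioritize_critical_treatments_py_alt treatments
instance (treatments : List String) (out : List String) : Decidable (Spec_prioritize_critical_treatments_py treatments out) := by unfold Spec_prioritize_critical_treatments_py; infer_instance

-- ===== CLAIM (what is proved, stated in full; the proofs are below) =====
def Claim_equal_prioritize_critical_treatments_py : Prop := ∀ (treatments : List String), Dom_prioritize_critical_treatments_py treatments → Spec_prioritize_critical_treatments_py treatments (prioritize_critical_treatments_py treatments)

-- ===== LEMMAS AND PROOFS =====

-- B's sort key, named for the proofs
def pvKeyFn (t : String) : Int := pvRank.getD t ((pvPriorityOrder.length : Int))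

-- the "append first occurrences not yet in acc" residue of A's second loop
def pvRemDedup (acc : List String) : List String → List String
  | [] => []
  | t :: r => if t ∈ acc then pvRemDedup acc r else t :: pvRemDedup (acc ++ [t]) r

theorem pvFoldA (xs : List String) : ∀ (acc : List String),
    xs.foldl (fun a t => if t ∈ a then a else a ++ [t]) acc = acc ++ pvRemDedup acc xs := by
  induction xs with
  | nil => intro acc; simp [pvRemDedup]
  | cons t r ih =>
    intro acc
    by_cases h : t ∈ acc
    · simpa [pvRemDedup, h] using ih acc
    · simp only [List.foldl_cons, if_neg h, ih (acc ++ [t]), pvRemDedup]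
      simp

theorem pvFoldSet (xs : List String) : ∀ (s : List String),
    xs.foldl PySem.Set.add s = s ++ pvRemDedup s xs := by
  induction xs with
  | nil => intro s; simp [pvRemDedup]
  | cons t r ih =>
    intro s
    by_cases h : t ∈ s
    · simp [PySem.Set.add, pvRemDedup, h, ih]
    · simp [PySem.Set.add, pvRemDedup, h, ih, List.append_assoc]

theorem pvKey (xs : List String) : ∀ (P seen : List String),
    (∀ t ∈ xs, (t ∈ P ↔ (t ∈ pvPriorityOrder ∨ t ∈ seen))) →
    pvRemDedup P xs = (pvRemDedup seen xs).filter (fun t => !decide (t ∈ pvPriorityOrder)) := by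
  induction xs with
  | nil => intro P seen _; simp [pvRemDedup]
  | cons t r ih =>
    intro P seen h
    have ht := h t (by simp)
    by_cases hP : t ∈ P
    · rcases ht.mp hP with hprio | hseen
      · by_cases hseen : t ∈ seen
        · simp only [pvRemDedup, if_pos hP, if_pos hseen]
          exact ih P seen (fun s hs => h s (List.mem_cons_of_mem _ hs))
        · simp only [pvRemDedup, if_pos hP, if_neg hseen, List.filter_cons,
            hprio, decide_true, Bool.not_true]
          exact ih P (seen ++ [t]) (fun s hs => by
            rcases h s (List.mem_cons_of_mem _ hs) with h'
            simp only [List.mem_append, List.mem_singleton]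
            constructor
            · intro hsP; rcases h'.mp hsP with h1 | h2
              · exact Or.inl h1
              · exact Or.inr (Or.inl h2)
            · rintro (h1 | h2 | h3)
              · exact h'.mpr (Or.inl h1)
              · exact h'.mpr (Or.inr h2)
              · subst h3; exact hP)
      · simp only [pvRemDedup, if_pos hP, if_pos hseen]
        exact ih P seen (fun s hs => h s (List.mem_cons_of_mem _ hs))
    · have hnp : t ∉ pvPriorityOrder := fun hc => hP (ht.mpr (Or.inl hc))
      have hns : t ∉ seen := fun hc => hP (ht.mpr (Or.inr hc))
      simp only [pvRemDedup, if_neg hP, if_neg hns, List.filter_cons,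
        hnp, decide_false, Bool.not_false, if_true]
      rw [ih (P ++ [t]) (seen ++ [t]) (fun s hs => by
        have h' := h s (List.mem_cons_of_mem _ hs)
        simp only [List.mem_append, List.mem_singleton]
        constructor
        · rintro (h1 | h2)
          · rcases h'.mp h1 with h3 | h4
            · exact Or.inl h3
            · exact Or.inr (Or.inl h4)
          · exact Or.inr (Or.inr h2)
        · rintro (h1 | h2 | h3)
          · exact Or.inl (h'.mpr (Or.inl h1))
          · exact Or.inl (h'.mpr (Or.inr h2))
          · exact Or.inr h3)]

-- key facts about pvKeyFn
theorem pvKeyFn_notin (t : String) (h : t ∉ pvPriorityOrder) : pvKeyFn t = 9 := by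
  simp only [pvPriorityOrder, List.mem_cons, List.not_mem_nil, or_false, not_or] at h
  obtain ⟨h1, h2, h3, h4, h5, h6, h7, h8, h9⟩ := h
  have b1 : ("tourniquet" == t) = false := beq_eq_false_iff_ne.mpr (Ne.symm h1)
  have b2 : ("airway_positioning" == t) = false := beq_eq_false_iff_ne.mpr (Ne.symm h2)
  have b3 : ("needle_decompression" == t) = false := beq_eq_false_iff_ne.mpr (Ne.symm h3)
  have b4 : ("pressure_bandage" == t) = false := beq_eq_false_iff_ne.mpr (Ne.symm h4)
  have b5 : ("hemostatic_gauze" == t) = false := beq_eq_false_iff_ne.mpr (Ne.symm h5)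
  have b6 : ("iv_access" == t) = false := beq_eq_false_iff_ne.mpr (Ne.symm h6)
  have b7 : ("blood_transfusion" == t) = false := beq_eq_false_iff_ne.mpr (Ne.symm h7)
  have b8 : ("damage_control_surgery" == t) = false := beq_eq_false_iff_ne.mpr (Ne.symm h8)
  have b9 : ("intubation" == t) = false := beq_eq_false_iff_ne.mpr (Ne.symm h9)
  simp [pvKeyFn, pvRank, pvPriorityOrder, PySem.Dict.getD, PySem.Dict.get?,
    PySem.List.enumerate, PySem.Dict.insert, PySem.Dict.empty, PySem.Dict.contains,
    List.find?, b1, b2, b3, b4, b5, b6, b7, b8, b9]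

theorem pvKeyFn_le (t : String) : pvKeyFn t ≤ 9 := by
  by_cases h : t ∈ pvPriorityOrder
  · revert h
    have : ∀ t ∈ pvPriorityOrder, pvKeyFn t ≤ 9 := by decide
    exact this t
  · rw [pvKeyFn_notin t h]

-- where t sits in the priority list, and how its rank compares to its neighbours'
theorem pvPrioSplit (t : String) (h : t ∈ pvPriorityOrder) :
    ∃ r : Nat, pvKeyFn t = (r : Int) ∧
      pvPriorityOrder = pvPriorityOrder.take r ++ t :: pvPriorityOrder.drop (r + 1) ∧
      (∀ y ∈ pvPriorityOrder.take r, pvKeyFn y < (r : Int)) ∧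
      (∀ y ∈ pvPriorityOrder.drop (r + 1), (r : Int) < pvKeyFn y) := by
  simp only [pvPriorityOrder, List.mem_cons, List.not_mem_nil, or_false] at h
  rcases h with h | h | h | h | h | h | h | h | h <;> subst h
  · exact ⟨0, by decide, by decide, by decide, by decide⟩
  · exact ⟨1, by decide, by decide, by decide, by decide⟩
  · exact ⟨2, by decide, by decide, by decide, by decide⟩
  · exact ⟨3, by decide, by decide, by decide, by decide⟩
  · exact ⟨4, by decide, by decide, by decide, by decide⟩
  · exact ⟨5, by decide, by decide, by decide, by decide⟩
  · exact ⟨6, by decide, by decide, by decide, by decide⟩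
  · exact ⟨7, by decide, by decide, by decide, by decide⟩
  · exact ⟨8, by decide, by decide, by decide, by decide⟩

-- insertBy inserts before the first hit: a split form
theorem pvInsertBy_split (before : String → String → Bool) (x : String) :
    ∀ (l₁ l₂ : List String), (∀ y ∈ l₁, before x y = false) →
      (∀ y ∈ l₂, before x y = true) →
      PySem.List.insertBy before x (l₁ ++ l₂) = l₁ ++ x :: l₂ := by
  intro l₁
  induction l₁ with
  | nil =>
    intro l₂ _ h₂
    cases l₂ with
    | nil => rfl
    | cons y ys => simp [PySem.List.insertBy, h₂ y (by simp)]
  | cons a l ih =>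
    intro l₂ h₁ h₂
    have ha : before x a = false := h₁ a (by simp)
    simp only [List.cons_append, PySem.List.insertBy, ha, Bool.false_eq_true, if_false]
    rw [ih l₂ (fun y hy => h₁ y (by simp [hy])) h₂]

-- A's result as a function of the (deduplicated) input
def pvTarget (p : List String) : List String :=
  pvPriorityOrder.filter (fun t => decide (t ∈ p)) ++ p.filter (fun t => !decide (t ∈ pvPriorityOrder))

def pvBef (a b : String) : Bool := decide (pvKeyFn a < pvKeyFn b)

-- one insertion step of B's sort preserves the target shape
theorem pvStep (p : List String) (t : String) (ht : t ∉ p) :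
    PySem.List.insertBy pvBef t (pvTarget p) = pvTarget (p ++ [t]) := by
  by_cases hprio : t ∈ pvPriorityOrder
  · obtain ⟨r, hk, hsplit, hlt, hgt⟩ := pvPrioSplit t hprio
    have htake : t ∉ pvPriorityOrder.take r := by
      intro hc
      exact absurd hk (by have := hlt t hc; omega)
    have hdrop : t ∉ pvPriorityOrder.drop (r + 1) := by
      intro hc
      exact absurd hk (by have := hgt t hc; omega)
    have htk : (pvPriorityOrder.take r).filter (fun s => decide (s ∈ p ++ [t])) =
        (pvPriorityOrder.take r).filter (fun s => decide (s ∈ p)) :=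
      List.filter_congr (fun y hy => by
        have hyt : y ≠ t := fun he => htake (he ▸ hy)
        simp [hyt])
    have hdr : (pvPriorityOrder.drop (r + 1)).filter (fun s => decide (s ∈ p ++ [t])) =
        (pvPriorityOrder.drop (r + 1)).filter (fun s => decide (s ∈ p)) :=
      List.filter_congr (fun y hy => by
        have hyt : y ≠ t := fun he => hdrop (he ▸ hy)
        simp [hyt])
    have hfilter₁ :
        pvPriorityOrder.filter (fun s => decide (s ∈ p)) =
          (pvPriorityOrder.take r).filter (fun s => decide (s ∈ p)) ++
            (pvPriorityOrder.drop (r + 1)).filter (fun s => decide (s ∈ p)) := by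
      conv_lhs => rw [hsplit]
      simp [List.filter_append, ht]
    have hfilter₂ :
        pvPriorityOrder.filter (fun s => decide (s ∈ p ++ [t])) =
          (pvPriorityOrder.take r).filter (fun s => decide (s ∈ p)) ++
            t :: (pvPriorityOrder.drop (r + 1)).filter (fun s => decide (s ∈ p)) := by
      conv_lhs => rw [hsplit]
      rw [List.filter_append, List.filter_cons, htk, hdr]
      simp
    have hrest : (p ++ [t]).filter (fun s => !decide (s ∈ pvPriorityOrder)) =
        p.filter (fun s => !decide (s ∈ pvPriorityOrder)) := by
      simp [List.filter_append, hprio]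
    have hins := pvInsertBy_split pvBef t
      ((pvPriorityOrder.take r).filter (fun s => decide (s ∈ p)))
      ((pvPriorityOrder.drop (r + 1)).filter (fun s => decide (s ∈ p)) ++
        p.filter (fun s => !decide (s ∈ pvPriorityOrder)))
      (by
        intro y hy
        have := hlt y (List.mem_of_mem_filter hy)
        simp only [pvBef, hk, decide_eq_false_iff_not, not_lt]
        omega)
      (by
        intro y hy
        rcases List.mem_append.mp hy with hy | hy
        · have := hgt y (List.mem_of_mem_filter hy)
          simp only [pvBef, hk, decide_eq_true_eq]
          omega
        · have hy' : y ∉ pvPriorityOrder := by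
            have := List.of_mem_filter hy
            simpa using this
          have h9 := pvKeyFn_notin y hy'
          have hr : (r : Int) < 9 := by
            have hall : ∀ s ∈ pvPriorityOrder, pvKeyFn s < 9 := by decide
            have := hall t hprio; omega
          simp only [pvBef, hk, h9, decide_eq_true_eq]
          omega)
    unfold pvTarget
    rw [hfilter₁, List.append_assoc, hins, hfilter₂, hrest]
    simp [List.append_assoc]
  · have h9 : pvKeyFn t = 9 := pvKeyFn_notin t hprio
    have hall : ∀ y ∈ pvTarget p, pvBef t y = false := by
      intro y _
      have := pvKeyFn_le y
      simp only [pvBef, h9, decide_eq_false_iff_not, not_lt]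
      omega
    rw [PySem.List.insertBy_of_forall_not_before pvBef t _ hall]
    have hfix : pvPriorityOrder.filter (fun s => decide (s ∈ p ++ [t])) =
        pvPriorityOrder.filter (fun s => decide (s ∈ p)) :=
      List.filter_congr (fun y hy => by
        have hyt : y ≠ t := fun he => hprio (he ▸ hy)
        simp [hyt])
    have h2 : (p ++ [t]).filter (fun s => !decide (s ∈ pvPriorityOrder)) =
        p.filter (fun s => !decide (s ∈ pvPriorityOrder)) ++ [t] := by
      simp [List.filter_append, hprio]
    unfold pvTarget
    rw [hfix, h2, List.append_assoc]

-- B's whole sort, by reverse induction with pvStep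
theorem pvSortEq (p : List String) (hnd : p.Nodup) :
    PySem.List.sorted p pvKeyFn = pvTarget p := by
  rw [PySem.List.sorted_eq_foldl_insertBy]
  induction p using List.reverseRecOn with
  | nil => simp [pvTarget]
  | append_singleton q t ih =>
    have hnd' : q.Nodup := (List.nodup_append.mp hnd).1
    have ht : t ∉ q := by
      have h := List.nodup_append.mp hnd
      intro hc
      exact h.2.2 t hc t (by simp) rfl
    rw [List.foldl_append, ih hnd', List.foldl_cons, List.foldl_nil]
    exact pvStep q t ht

-- ===== VERDICT (by name: the statement is the Claim_ definition above) =====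
theorem prioritize_critical_treatments_py_spec : Claim_equal_prioritize_critical_treatments_py := by
  intro ts _
  unfold Spec_prioritize_critical_treatments_py prioritize_critical_treatments_py prioritize_critical_treatments_py_alt
  have hkey : (fun t => pvRank.getD t ((pvPriorityOrder.length : Int))) = pvKeyFn := by
    funext t; rfl
  rw [hkey, pvSortEq (PySem.List.dedup ts) (by simp [PySem.List.dedup_eq_ofList, PySem.Set.nodup_ofList])]
  simp only [ite_not]
  rw [PySem.List.foldl_append_ite_eq_filter, List.nil_append, pvFoldA]
  have hded : PySem.List.dedup ts = pvRemDedup [] ts := by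
    rw [PySem.List.dedup_eq_ofList]
    show ts.foldl PySem.Set.add PySem.Set.empty = _
    rw [pvFoldSet]; rfl
  unfold pvTarget
  congr 1
  · refine List.filter_congr ?_
    intro t _
    by_cases h : t ∈ ts
    · simp [h]
    · simp [h]
  · rw [pvKey ts _ [] (fun t ht => by simp [List.mem_filter, ht]), hded]
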